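-- pv_equiv track=rewrite | github.com/jonasschneider/instabil | abitex/common.py | beautify_quotation
-- ===== SOURCE A (Python) =====
-- def beautify_quotation(text) :
--   quotation  = ","
--   out = ""
--   text = text.replace(u"—", "--")
--
--   text = text.replace("&nbsp;", "\\/")
--   for c in text :
--     if c != '"' :
--       out += c
--     else :
--       if quotation == "," :
--         out += quotation*2
--         quotation = "'"
--       else :
--         out += quotation*2
--         quotation = ","
--   return out
-- ===== SOURCE B (Python) =====
-- def beautify_quotation(text):
--     text = text.replace("\u2014", "--")
--     text = text.replace("&nbsp;", "\\/")
--     first, *rest = text.split('"')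
--     for j, seg in enumerate(rest):
--         first += (",," if j % 2 == 0 else "''") + seg
--     return first
-- ===== Notes on version B (the rewrite author's own statement) =====
-- stated objective: idiomatic
-- what changed: Replaces the per-character loop with a mutable quotation-state variable by splitting the text on the quote character and rejoining the segments with markers chosen by segment-index parity.
import Mathlib
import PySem

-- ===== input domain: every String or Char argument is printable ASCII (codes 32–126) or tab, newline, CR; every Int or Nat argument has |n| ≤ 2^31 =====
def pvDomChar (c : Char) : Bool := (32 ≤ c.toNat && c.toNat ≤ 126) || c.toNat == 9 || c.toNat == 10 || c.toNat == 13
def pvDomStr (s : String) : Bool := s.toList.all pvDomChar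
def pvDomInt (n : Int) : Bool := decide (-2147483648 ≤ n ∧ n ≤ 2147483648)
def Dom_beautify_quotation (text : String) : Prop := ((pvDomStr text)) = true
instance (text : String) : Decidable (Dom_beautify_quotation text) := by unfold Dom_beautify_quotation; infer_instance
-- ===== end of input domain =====

-- B replaces A's per-character loop with a mutable quotation-state variable by splitting on '"'
-- and rejoining the segments with markers chosen by segment-index parity (idiomatic decomposition).


-- ===== PORT A =====
-- A's for-loop; the state `quotation` holds the single character Python stores (A appends quotation*2).
def aGo : List Char → Char → List Char → List Char
  | [], _, out => out
  | c :: rest, q, out =>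
    if c ≠ '"' then aGo rest q (out ++ [c])
    else if q = ',' then aGo rest '\'' (out ++ [',', ','])
    else aGo rest ',' (out ++ ['\'', '\''])

def beautify_quotation (text : String) : String :=
  let t1 := PySem.Chars.replace text.toList "—".toList "--".toList
  let t2 := PySem.Chars.replace t1 "&nbsp;".toList "\\/".toList
  String.mk (aGo t2 ',' [])

-- ===== PORT B =====
def beautify_quotation_alt (text : String) : String :=
  let t1 := PySem.Chars.replace text.toList "—".toList "--".toList
  let t2 := PySem.Chars.replace t1 "&nbsp;".toList "\\/".toList
  match PySem.Chars.splitOn t2 ['"'] with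
  | [] => ""   -- unreachable: str.split never returns an empty list (totality guard)
  | first :: rest =>
      String.mk ((PySem.List.enumerate rest 0).foldl
        (fun acc x =>
          acc ++ (if PySem.Int.mod x.1 2 == 0 then [',', ','] else ['\'', '\'']) ++ x.2) first)

-- ===== PRECONDITION & SPEC =====
def Spec_beautify_quotation (text : String) (out : String) : Prop := out = beautify_quotation_alt text
instance (text : String) (out : String) : Decidable (Spec_beautify_quotation text out) := by unfold Spec_beautify_quotation; infer_instance

-- ===== CLAIM (what is proved, stated in full; the proofs are below) =====
def Claim_equal_beautify_quotation : Prop := ∀ (text : String), Dom_beautify_quotation text → Spec_beautify_quotation text (beautify_quotation text)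

-- ===== LEMMAS AND PROOFS =====
-- structural characterisation of split on '"'
def splitQ : List Char → List (List Char)
  | [] => [[]]
  | c :: rest =>
    if c = '"' then [] :: splitQ rest
    else match splitQ rest with
      | [] => [[c]]
      | p :: ps => (c :: p) :: ps

theorem splitQ_ne_nil (cs : List Char) : splitQ cs ≠ [] := by
  cases cs with
  | nil => simp [splitQ]
  | cons c rest =>
    simp only [splitQ]
    split_ifs with h
    · simp
    · cases splitQ rest <;> simp

theorem headI_cons_tail {α : Type} [Inhabited α] (l : List α) (h : l ≠ []) : l.headI :: l.tail = l := by
  cases l with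
  | nil => exact absurd rfl h
  | cons a t => rfl

def mark (b : Bool) : List Char := if b then [',', ','] else ['\'', '\'']

def glueT (b : Bool) : List (List Char) → List Char
  | [] => []
  | p :: ps => mark b ++ p ++ glueT (!b) ps

def headGlue (b : Bool) (l : List (List Char)) : List Char :=
  match l with
  | [] => []
  | p :: ps => p ++ glueT b ps

theorem go_eq_splitQ (l : List Char) : ∀ (fuel : Nat) (cur : List Char) (acc : List (List Char)),
    l.length ≤ fuel →
    PySem.Chars.splitOn.go ['"'] fuel l cur acc =
      acc.reverse ++ ((cur.reverse ++ (splitQ l).headI) :: (splitQ l).tail) := by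
  induction l with
  | nil =>
    intro fuel cur acc _
    cases fuel <;> simp [PySem.Chars.splitOn.go, splitQ]
  | cons c rest ih =>
    intro fuel cur acc hf
    cases fuel with
    | zero => simp at hf
    | succ f =>
      simp only [List.length_cons] at hf
      by_cases hc : c = '"'
      · subst hc
        rw [show PySem.Chars.splitOn.go ['"'] (f+1) ('"' :: rest) cur acc =
              PySem.Chars.splitOn.go ['"'] f rest [] (cur.reverse :: acc) by
            simp [PySem.Chars.splitOn.go, List.isPrefixOf]]
        rw [ih f [] (cur.reverse :: acc) (by omega)]
        cases hsp : splitQ rest with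
        | nil => exact absurd hsp (splitQ_ne_nil rest)
        | cons p ps => simp [splitQ, hsp]
      · rw [show PySem.Chars.splitOn.go ['"'] (f+1) (c :: rest) cur acc =
              PySem.Chars.splitOn.go ['"'] f rest (c :: cur) acc by
            simp [PySem.Chars.splitOn.go, List.isPrefixOf, Ne.symm hc]]
        rw [ih f (c :: cur) acc (by omega)]
        cases hsp : splitQ rest with
        | nil => exact absurd hsp (splitQ_ne_nil rest)
        | cons p ps => simp [splitQ, hc, hsp]

theorem splitOn_eq_splitQ (l : List Char) :
    PySem.Chars.splitOn l ['"'] = splitQ l := by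
  unfold PySem.Chars.splitOn
  rw [go_eq_splitQ l (l.length + 1) [] [] (by omega)]
  simpa using headI_cons_tail _ (splitQ_ne_nil l)

def qc (b : Bool) : Char := if b then ',' else '\''

theorem aGo_eq_glue (cs : List Char) : ∀ (b : Bool) (out : List Char),
    aGo cs (qc b) out = out ++ headGlue b (splitQ cs) := by
  induction cs with
  | nil => intro b out; simp [aGo, splitQ, headGlue, glueT]
  | cons c rest ih =>
    intro b out
    by_cases hc : c = '"'
    · subst hc
      have h1 : aGo ('"' :: rest) (qc b) out =
          if qc b = ',' then aGo rest '\'' (out ++ [',', ','])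
          else aGo rest ',' (out ++ ['\'', '\'']) := by
        simp [aGo]
      cases b with
      | true =>
        rw [h1, if_pos (show qc true = ',' from rfl)]
        have h2 : aGo rest '\'' (out ++ [',', ',']) =
            (out ++ [',', ',']) ++ headGlue false (splitQ rest) := ih false (out ++ [',', ','])
        rw [h2]
        cases hsp : splitQ rest with
        | nil => exact absurd hsp (splitQ_ne_nil rest)
        | cons p ps => simp [splitQ, hsp, headGlue, glueT, mark]
      | false =>
        rw [h1, if_neg (show qc false ≠ ',' by decide)]
        have h2 : aGo rest ',' (out ++ ['\'', '\'']) =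
            (out ++ ['\'', '\'']) ++ headGlue true (splitQ rest) := ih true (out ++ ['\'', '\''])
        rw [h2]
        cases hsp : splitQ rest with
        | nil => exact absurd hsp (splitQ_ne_nil rest)
        | cons p ps => simp [splitQ, hsp, headGlue, glueT, mark]
    · have h1 : aGo (c :: rest) (qc b) out = aGo rest (qc b) (out ++ [c]) := by
        simp [aGo, hc]
      rw [h1, ih b (out ++ [c])]
      cases hsp : splitQ rest with
      | nil => exact absurd hsp (splitQ_ne_nil rest)
      | cons p ps => simp [splitQ, hc, hsp, headGlue]

theorem mod_two_flip (j : Int) :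
    (PySem.Int.mod (j + 1) 2 == 0) = !(PySem.Int.mod j 2 == 0) := by
  simp only [PySem.Int.mod, Int.fmod_eq_emod]
  by_cases h : j % 2 = 0
  · have : (j + 1) % 2 = 1 := by omega
    simp [this, h]
  · have : (j + 1) % 2 = 0 := by omega
    simp [this, h]

theorem foldl_enumerate_eq_glueT (ps : List (List Char)) :
    ∀ (j : Int) (acc : List Char),
    (PySem.List.enumerate ps j).foldl
        (fun acc x =>
          acc ++ (if PySem.Int.mod x.1 2 == 0 then [',', ','] else ['\'', '\'']) ++ x.2) acc
      = acc ++ glueT (PySem.Int.mod j 2 == 0) ps := by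
  induction ps with
  | nil => intro j acc; simp [PySem.List.enumerate, glueT]
  | cons p ps ih =>
    intro j acc
    rw [PySem.List.enumerate_cons, List.foldl_cons, ih (j + 1), mod_two_flip]
    simp only [glueT, mark]
    cases h : (PySem.Int.mod j 2 == 0) <;> simp [List.append_assoc]

-- ===== VERDICT (by name: the statement is the Claim_ definition above) =====
theorem beautify_quotation_spec : Claim_equal_beautify_quotation := by
  intro text _
  unfold Spec_beautify_quotation beautify_quotation beautify_quotation_alt
  simp only [splitOn_eq_splitQ]
  generalize (PySem.Chars.replace (PySem.Chars.replace text.toList "—".toList "--".toList)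
      "&nbsp;".toList "\\/".toList) = t2
  cases hsp : splitQ t2 with
  | nil => exact absurd hsp (splitQ_ne_nil t2)
  | cons first rest =>
    show String.mk (aGo t2 ',' []) =
      String.mk ((PySem.List.enumerate rest 0).foldl
        (fun acc x =>
          acc ++ (if PySem.Int.mod x.1 2 == 0 then [',', ','] else ['\'', '\'']) ++ x.2) first)
    rw [foldl_enumerate_eq_glueT rest 0]
    have h2 : aGo t2 ',' [] = [] ++ headGlue true (splitQ t2) := aGo_eq_glue t2 true []
    rw [h2, hsp]
    simp [headGlue]
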